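-- pv_equiv track=rewrite | github.com/Amendor47/Studying-coach | services/educational_ai.py | _create_fill_blanks
-- ===== SOURCE A (Python) =====
-- def _create_fill_blanks(text: str) -> str:
--     """Create a fill-in-the-blanks version of text"""
--     words = text.split()
--     important_words_indices = []
--
--     for i, word in enumerate(words):
--         if (len(word) > 6 and
--             word.lower() not in ['cependant', 'toutefois', 'néanmoins', 'pourtant']):
--             important_words_indices.append(i)
--
--     # Replace every 4th important word with a blank
--     for i in important_words_indices[::4]:
--         words[i] = "______"
--
--     return " ".join(words)
-- ===== SOURCE B (Python) =====
-- def _create_fill_blanks(text: str) -> str: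
--     """Create a fill-in-the-blanks version of text (single pass with a counter)."""
--     out = []
--     count = 0
--     for word in text.split():
--         if len(word) > 6 and word.lower() not in ('cependant', 'toutefois', 'néanmoins', 'pourtant'):
--             out.append("______" if count % 4 == 0 else word)
--             count += 1
--         else:
--             out.append(word)
--     return " ".join(out)
-- ===== Notes on version B (the rewrite author's own statement) =====
-- stated objective: simpler
-- what changed: Single pass with a running counter of important words (blank when counter % 4 == 0) instead of materialising an index list, slicing it [::4] and mutating the word list.
import Mathlib
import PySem

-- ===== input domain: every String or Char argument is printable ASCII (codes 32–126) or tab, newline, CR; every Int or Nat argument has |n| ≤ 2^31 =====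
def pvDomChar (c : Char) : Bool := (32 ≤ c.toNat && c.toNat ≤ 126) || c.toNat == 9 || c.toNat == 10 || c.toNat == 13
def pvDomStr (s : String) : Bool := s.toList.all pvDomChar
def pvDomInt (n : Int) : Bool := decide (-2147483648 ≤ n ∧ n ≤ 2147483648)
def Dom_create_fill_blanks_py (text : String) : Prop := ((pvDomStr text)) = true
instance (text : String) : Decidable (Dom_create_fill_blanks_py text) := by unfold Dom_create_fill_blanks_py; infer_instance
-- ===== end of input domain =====

-- B replaces A's two-pass index-list + [::4]-slice + in-place mutation by a single
-- pass with a running counter of important words (objective: simpler).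


-- shared helper: the Python test `len(word) > 6 and word.lower() not in [...]`
def pvImp (w : String) : Bool :=
  decide (6 < PySem.Str.len w) &&
  !(["cependant", "toutefois", "néanmoins", "pourtant"].contains (PySem.Str.lower w))

-- ===== PORT A =====
def create_fill_blanks_py (text : String) : String :=
  let words := PySem.Str.split₀ text
  let important_words_indices : List Int :=
    (PySem.List.enumerate words 0).foldl
      (fun acc p => if pvImp p.2 then acc ++ [p.1] else acc) []
  -- important_words_indices[::4]; step 4 ≠ 0, so slice? is always `some`
  let sel : List Int := (PySem.List.slice? important_words_indices none none 4).getD []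
  let words2 := sel.foldl (fun ws i => PySem.List.pySetD ws i "______") words
  PySem.Str.join " " words2

-- ===== PORT B =====
def create_fill_blanks_py_alt (text : String) : String :=
  let r := (PySem.Str.split₀ text).foldl
    (fun (st : List String × Nat) w =>
      if pvImp w then
        (st.1 ++ [if st.2 % 4 = 0 then "______" else w], st.2 + 1)
      else
        (st.1 ++ [w], st.2)) ([], 0)
  PySem.Str.join " " r.1

-- ===== PRECONDITION & SPEC =====
def Spec_create_fill_blanks_py (text : String) (out : String) : Prop := out = create_fill_blanks_py_alt text
instance (text : String) (out : String) : Decidable (Spec_create_fill_blanks_py text out) := by unfold Spec_create_fill_blanks_py; infer_instance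

-- ===== CLAIM (what is proved, stated in full; the proofs are below) =====
def Claim_equal_create_fill_blanks_py : Prop := ∀ (text : String), Dom_create_fill_blanks_py text → Spec_create_fill_blanks_py text (create_fill_blanks_py text)

-- ===== LEMMAS AND PROOFS =====

lemma pv_enum_cons (w : String) (ws : List String) (n : Int) :
    PySem.List.enumerate (w :: ws) n = (n, w) :: PySem.List.enumerate ws (n + 1) := rfl

-- the list of (absolute) indices of important words, starting at position n
def pvIdx : List String → Int → List Int
  | [], _ => []
  | w :: ws, n => (if pvImp w then [n] else []) ++ pvIdx ws (n + 1)

-- number of important words strictly before position j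
def pvCnt (ws : List String) (j : Nat) : Nat := (ws.take j).countP (fun w => pvImp w)

-- B's output word list, given c important words already seen
def pvSpec : List String → Nat → List String
  | [], _ => []
  | w :: ws, c =>
    (if pvImp w then (if c % 4 = 0 then "______" else w) else w) ::
      pvSpec ws (c + if pvImp w then 1 else 0)

lemma pvCnt_zero (ws : List String) : pvCnt ws 0 = 0 := rfl

lemma pvCnt_succ (w : String) (ws : List String) (j : Nat) :
    pvCnt (w :: ws) (j + 1) = (if pvImp w then 1 else 0) + pvCnt ws j := by
  simp only [pvCnt, List.take_succ_cons, List.countP_cons]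
  split_ifs <;> omega

lemma enum_foldl : ∀ (ws : List String) (n : Int) (acc : List Int),
    (PySem.List.enumerate ws n).foldl
      (fun acc p => if pvImp p.2 then acc ++ [p.1] else acc) acc = acc ++ pvIdx ws n := by
  intro ws
  induction ws with
  | nil => intro n acc; simp [pvIdx]
  | cons w ws ih =>
    intro n acc
    rw [pv_enum_cons]
    by_cases h : pvImp w
    · simp [pvIdx, h, ih (n + 1)]
    · simp [pvIdx, h, ih (n + 1)]

lemma pvIdx_get : ∀ (ws : List String) (n : Int) (k : Nat) (i : Int),
    (pvIdx ws n)[k]? = some i →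
    ∃ j, ∃ hj : j < ws.length, i = n + j ∧ pvImp ws[j] = true ∧ pvCnt ws j = k := by
  intro ws
  induction ws with
  | nil => intro n k i h; simp [pvIdx] at h
  | cons w ws ih =>
    intro n k i h
    by_cases hw : pvImp w
    · simp only [pvIdx, hw, if_pos, List.singleton_append] at h
      match k with
      | 0 =>
        simp only [List.getElem?_cons_zero, Option.some.injEq] at h
        exact ⟨0, by simp, by simp [h.symm], by simpa using hw, rfl⟩
      | k + 1 =>
        rw [List.getElem?_cons_succ] at h
        obtain ⟨j, hj, hi, himp, hcnt⟩ := ih (n + 1) k i h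
        refine ⟨j + 1, by simpa using hj, by rw [hi]; push_cast; ring, by simpa using himp, ?_⟩
        rw [pvCnt_succ, hcnt, if_pos hw]
        omega
    · simp only [pvIdx, hw, Bool.false_eq_true, if_false, List.nil_append] at h
      obtain ⟨j, hj, hi, himp, hcnt⟩ := ih (n + 1) k i h
      refine ⟨j + 1, by simpa using hj, by rw [hi]; push_cast; ring, by simpa using himp, ?_⟩
      rw [pvCnt_succ, hcnt, if_neg hw]
      omega

lemma pvIdx_get' : ∀ (ws : List String) (n : Int) (j : Nat) (hj : j < ws.length),
    pvImp ws[j] = true → (pvIdx ws n)[pvCnt ws j]? = some (n + j) := by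
  intro ws
  induction ws with
  | nil => intro n j hj; simp at hj
  | cons w ws ih =>
    intro n j hj himp
    match j with
    | 0 =>
      have hw : pvImp w = true := by simpa using himp
      simp [pvIdx, hw, pvCnt_zero]
    | j + 1 =>
      have hrec := ih (n + 1) j (by simpa using hj) (by simpa using himp)
      rw [pvCnt_succ]
      by_cases hw : pvImp w
      · simp only [pvIdx, hw, if_pos, List.singleton_append]
        rw [show 1 + pvCnt ws j = pvCnt ws j + 1 from by omega, List.getElem?_cons_succ, hrec]
        congr 1; push_cast; ring
      · simp only [pvIdx, hw, Bool.false_eq_true, if_false, List.nil_append]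
        rw [Nat.zero_add, hrec]
        congr 1; push_cast; ring

-- membership in xs[::4]
lemma mem_sel (idxs : List Int) (i : Int) :
    i ∈ (PySem.List.slice? idxs none none 4).getD [] ↔
      ∃ k : Nat, idxs[4 * k]? = some i := by
  simp only [PySem.List.slice?, PySem.List.sliceIndices]
  simp only [show ¬((4:Int) = 0) from by norm_num, if_false, show ¬((4:Int) < 0) from by norm_num,
    if_pos (show (0:Int) < 4 from by norm_num)]
  simp only [Option.getD_some, List.mem_filterMap, List.mem_range]
  constructor
  · rintro ⟨k, hk, hget⟩
    refine ⟨k, ?_⟩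
    rw [show ((0 + 4 * (k : Int)).toNat) = 4 * k from by omega] at hget
    exact hget
  · rintro ⟨k, hget⟩
    have hlt : 4 * k < idxs.length := (List.getElem?_eq_some_iff.mp hget).1
    refine ⟨k, ?_, ?_⟩
    · split_ifs with h
      · omega
      · omega
    · rw [show ((0 + 4 * (k : Int)).toNat) = 4 * k from by omega]
      exact hget

lemma foldl_set_get (b : String) : ∀ (sel : List Int) (ws : List String),
    (∀ i ∈ sel, ∃ m : Nat, i = (m : Int) ∧ m < ws.length) →
    ∀ j : Nat,
      (sel.foldl (fun ws i => PySem.List.pySetD ws i b) ws)[j]? =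
        if (j : Int) ∈ sel ∧ j < ws.length then some b else ws[j]? := by
  intro sel
  induction sel with
  | nil => intro ws _ j; simp
  | cons i rest ih =>
    intro ws hdom j
    obtain ⟨m, him, hm⟩ := hdom i List.mem_cons_self
    have hset : PySem.List.pySetD ws i b = ws.set m b := by
      rw [him, PySem.List.pySetD, PySem.List.pySet?_natCast ws m b hm]
      rfl
    simp only [List.foldl_cons, hset]
    rw [ih (ws.set m b) (by
      intro x hx
      obtain ⟨m', h1, h2⟩ := hdom x (List.mem_cons_of_mem _ hx)
      exact ⟨m', h1, by simpa using h2⟩) j]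
    simp only [List.length_set]
    by_cases hjr : (j : Int) ∈ rest ∧ j < ws.length
    · rw [if_pos hjr, if_pos ⟨List.mem_cons_of_mem _ hjr.1, hjr.2⟩]
    · rw [if_neg hjr]
      by_cases hjm : m = j
      · subst hjm
        rw [List.getElem?_set_self hm, if_pos ⟨by simp [him], hm⟩]
      · have hji : (j : Int) ≠ i := by
          rw [him]; intro hc; exact hjm (by exact_mod_cast hc.symm)
        have hnc : ¬ ((j : Int) ∈ i :: rest ∧ j < ws.length) := by
          rintro ⟨hmem, hlen⟩
          rcases List.mem_cons.mp hmem with h | h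
          · exact hji h
          · exact hjr ⟨h, hlen⟩
        rw [List.getElem?_set_ne hjm, if_neg hnc]

lemma b_fold : ∀ (ws : List String) (acc : List String) (c : Nat),
    (ws.foldl
      (fun (st : List String × Nat) w =>
        if pvImp w then
          (st.1 ++ [if st.2 % 4 = 0 then "______" else w], st.2 + 1)
        else
          (st.1 ++ [w], st.2)) (acc, c)) = (acc ++ pvSpec ws c, c + ws.countP (fun w => pvImp w)) := by
  intro ws
  induction ws with
  | nil => intro acc c; simp [pvSpec]
  | cons w ws ih =>
    intro ws' c
    by_cases hw : pvImp w
    · simp [hw, pvSpec, ih]; omega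
    · simp [hw, pvSpec, ih]

lemma pvSpec_get : ∀ (ws : List String) (c : Nat) (j : Nat),
    (pvSpec ws c)[j]? =
      if h : j < ws.length then
        some (if pvImp ws[j] = true ∧ (c + pvCnt ws j) % 4 = 0 then "______" else ws[j])
      else none := by
  intro ws
  induction ws with
  | nil => intro c j; simp [pvSpec]
  | cons w ws ih =>
    intro c j
    match j with
    | 0 =>
      simp only [pvSpec, List.getElem?_cons_zero, List.length_cons, Nat.zero_lt_succ, dif_pos,
        List.getElem_cons_zero, pvCnt_zero, Nat.add_zero]
      by_cases hw : pvImp w <;> simp [hw]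
    | j + 1 =>
      simp only [pvSpec, List.getElem?_cons_succ, ih, pvCnt_succ, List.length_cons,
        Nat.add_lt_add_iff_right, List.getElem_cons_succ]
      by_cases h : j < ws.length
      · rw [dif_pos h, dif_pos h]
        by_cases hw : pvImp w
        · simp only [hw, if_pos]
          rw [show c + (1 + pvCnt ws j) = c + 1 + pvCnt ws j from by omega]
        · simp [hw]
      · rw [dif_neg h, dif_neg h]

-- the key index characterisation: position j is blanked by A iff the j-th word is
-- important and an even-multiple-of-4 number of important words precede it
lemma sel_iff (ws : List String) (j : Nat) (hj : j < ws.length) :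
    ((j : Int) ∈ (PySem.List.slice? (pvIdx ws 0) none none 4).getD []) ↔
      (pvImp ws[j] = true ∧ pvCnt ws j % 4 = 0) := by
  rw [mem_sel]
  constructor
  · rintro ⟨k, hget⟩
    obtain ⟨j', hj', hi, himp, hcnt⟩ := pvIdx_get ws 0 (4 * k) (j : Int) hget
    have hjj : j' = j := by omega
    subst hjj
    exact ⟨himp, by omega⟩
  · rintro ⟨himp, hcnt⟩
    refine ⟨pvCnt ws j / 4, ?_⟩
    rw [show 4 * (pvCnt ws j / 4) = pvCnt ws j from by omega]
    have := pvIdx_get' ws 0 j hj himp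
    simpa using this

-- ===== VERDICT (by name: the statement is the Claim_ definition above) =====
theorem create_fill_blanks_py_spec : Claim_equal_create_fill_blanks_py := by
  intro text _
  unfold Spec_create_fill_blanks_py create_fill_blanks_py create_fill_blanks_py_alt
  rw [b_fold]
  simp only [List.nil_append, enum_foldl _ _ []]
  congr 1
  apply List.ext_getElem?
  intro j
  rw [foldl_set_get _ _ _ ?side j, pvSpec_get]
  simp only [Nat.zero_add]
  case side =>
    intro i hi
    rw [mem_sel] at hi
    obtain ⟨k, hget⟩ := hi
    obtain ⟨j', hj', hi', _, _⟩ := pvIdx_get _ _ _ _ hget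
    exact ⟨j', by simpa using hi', hj'⟩
  by_cases hj : j < (PySem.Str.split₀ text).length
  · rw [dif_pos hj]
    by_cases hc : pvImp (PySem.Str.split₀ text)[j] = true ∧ pvCnt (PySem.Str.split₀ text) j % 4 = 0
    · rw [if_pos ⟨(sel_iff _ j hj).mpr hc, hj⟩, if_pos hc]
    · rw [if_neg (fun h => hc ((sel_iff _ j hj).mp h.1)), if_neg hc,
        List.getElem?_eq_getElem hj]
  · rw [dif_neg hj]
    rw [if_neg (fun h => hj h.2)]
    exact List.getElem?_eq_none (by omega)
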